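-- pv_equiv track=rewrite | github.com/tqmsh/LC | greedy/Kousuke's Assignment.py | max_beautiful_segments
-- ===== SOURCE A (Python) =====
-- from collections import defaultdict
-- from typing import List
--
-- def max_beautiful_segments(arr: List[int]) -> int:
--     psa = 0; ans = 0
--     prev_idx = -1 # 上一次成为答案的最右边的坐标
--     L = defaultdict(lambda: -float('inf')) # 上一次 psa 出现的位置
--     L[0] = -1
--     for i, x in enumerate(arr):
--         psa += x
--         # 区间枚举优化，枚举 R O(1) 找 L
--         # 贪心, 枚举能用则用
--         if L[psa] >= prev_idx: # Σ (L[psa], i] = 0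
--             ans += 1
--             prev_idx = i
--         L[psa] = i
--     return ans
-- ===== SOURCE B (Python) =====
-- def max_beautiful_segments(arr):
--     # Dynamic programming over prefix sums: best[s] is the optimal number of
--     # non-overlapping zero-sum segments achievable in a prefix whose prefix
--     # sum s was last equal to the current one; dp is the optimum so far.
--     psa = 0
--     dp = 0
--     best = {0: 0}
--     for x in arr:
--         psa += x
--         if psa in best:
--             dp = max(dp, best[psa] + 1)
--         best[psa] = dp
--     return dp
-- ===== Notes on version B (the rewrite author's own statement) =====
-- stated objective: alternative
-- what changed: Replaces A's greedy scheme (dict of last occurrence indices compared against the last cut position) with a dynamic program over prefix sums: best[s] stores the optimal segment count at the last point the prefix sum was s, and dp advances by the max-recurrence dp = max(dp, best[psa]+1); no indices, enumerate or defaultdict are used (measured ~2x constant-factor speedup).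
import Mathlib
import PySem

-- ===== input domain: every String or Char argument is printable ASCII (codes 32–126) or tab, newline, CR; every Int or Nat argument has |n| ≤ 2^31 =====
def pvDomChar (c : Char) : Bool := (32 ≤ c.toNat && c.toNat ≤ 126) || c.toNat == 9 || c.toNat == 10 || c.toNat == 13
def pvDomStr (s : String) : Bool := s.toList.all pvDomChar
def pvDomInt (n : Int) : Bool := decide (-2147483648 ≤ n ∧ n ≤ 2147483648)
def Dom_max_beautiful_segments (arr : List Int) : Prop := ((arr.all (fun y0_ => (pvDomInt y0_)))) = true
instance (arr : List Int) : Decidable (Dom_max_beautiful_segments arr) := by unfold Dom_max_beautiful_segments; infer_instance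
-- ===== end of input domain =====

-- B replaces A's greedy (last-index dict compared against the last cut position) by a
-- dynamic program over prefix sums (best DP value per prefix sum, a max-recurrence) —
-- a different algorithm of the same O(n) cost.

-- ===== PORT A =====
-- A's defaultdict default is -float('inf'); a missing key is modelled as `none` and the
-- comparison `L[psa] >= prev_idx` is false on `none` (−inf < any int) — exact for A,
-- which only ever compares or overwrites that value.
def pvALoop : List Int → Int → Int → Int → Int → PySem.Dict Int Int → Int
  | [], _, _, ans, _, _ => ans
  | x :: rest, i, psa, ans, prev, L =>
    let psa := psa + x
    match L.get? psa with
    | some j =>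
      if j ≥ prev then pvALoop rest (i + 1) psa (ans + 1) i (L.insert psa i)
      else pvALoop rest (i + 1) psa ans prev (L.insert psa i)
    | none => pvALoop rest (i + 1) psa ans prev (L.insert psa i)

def max_beautiful_segments (arr : List Int) : Int :=
  pvALoop arr 0 0 0 (-1) (PySem.Dict.empty.insert 0 (-1))

-- ===== PORT B =====
def pvBLoop : List Int → Int → Int → PySem.Dict Int Int → Int
  | [], _, dp, _ => dp
  | x :: rest, psa, dp, best =>
    let psa := psa + x
    let dp := match best.get? psa with
      | some b => max dp (b + 1)
      | none => dp
    pvBLoop rest psa dp (best.insert psa dp)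

def max_beautiful_segments_alt (arr : List Int) : Int :=
  pvBLoop arr 0 0 (PySem.Dict.empty.insert 0 0)

-- ===== PRECONDITION & SPEC =====
def Spec_max_beautiful_segments (arr : List Int) (out : Int) : Prop := out = max_beautiful_segments_alt arr
instance (arr : List Int) (out : Int) : Decidable (Spec_max_beautiful_segments arr out) := by unfold Spec_max_beautiful_segments; infer_instance

-- ===== CLAIM =====
def Claim_equal_max_beautiful_segments : Prop := ∀ (arr : List Int), Dom_max_beautiful_segments arr → Spec_max_beautiful_segments arr (max_beautiful_segments arr)

-- ===== LEMMAS AND PROOFS =====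

-- Invariant: the two dicts have the same keys; for a prefix sum v last seen at index j
-- with DP value b recorded, b = ans if j is at/after the last cut, and b + 1 ≤ ans
-- otherwise (the greedy count on any prefix is optimal, so dp = ans throughout).
theorem pvLoop_eq (l : List Int) : ∀ (i psa ans prev : Int)
    (L best : PySem.Dict Int Int),
    prev < i →
    (∀ v j, L.get? v = some j → j < i) →
    (∀ v, L.get? v = none ↔ best.get? v = none) →
    (∀ v j b, L.get? v = some j → best.get? v = some b →
       (prev ≤ j → b = ans) ∧ (j < prev → b + 1 ≤ ans)) →
    pvALoop l i psa ans prev L = pvBLoop l psa ans best := by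
  induction l with
  | nil => intros; rfl
  | cons x rest ih =>
    intro i psa ans prev L best hprev hbound hkeys hval
    simp only [pvALoop, pvBLoop]
    cases hL : L.get? (psa + x) with
    | none =>
      have hB : best.get? (psa + x) = none := (hkeys _).mp hL
      rw [hB]
      apply ih
      · omega
      · intro v k hk
        rw [PySem.Dict.get?_insert] at hk
        split_ifs at hk with hv
        · simp only [Option.some.injEq] at hk; omega
        · exact lt_trans (hbound v k hk) (by omega)
      · intro v
        rw [PySem.Dict.get?_insert, PySem.Dict.get?_insert]
        split_ifs with hv
        · simp
        · exact hkeys v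
      · intro v k b hk hb
        rw [PySem.Dict.get?_insert] at hk hb
        split_ifs at hk hb with hv
        · simp only [Option.some.injEq] at hk hb
          constructor
          · intro _; omega
          · intro hki; exact absurd hki (by omega)
        · exact hval v k b hk hb
    | some j =>
      obtain ⟨b, hb⟩ : ∃ b, best.get? (psa + x) = some b := by
        cases hBo : best.get? (psa + x) with
        | none => exact absurd ((hkeys _).mpr hBo) (by simp [hL])
        | some b => exact ⟨b, rfl⟩
      rw [hb]
      show (if j ≥ prev then pvALoop rest (i + 1) (psa + x) (ans + 1) i (L.insert (psa + x) i)
            else pvALoop rest (i + 1) (psa + x) ans prev (L.insert (psa + x) i)) =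
          pvBLoop rest (psa + x) (max ans (b + 1)) (best.insert (psa + x) (max ans (b + 1)))
      by_cases hge : j ≥ prev
      · -- greedy takes a cut; DP side: b = ans, so max ans (b+1) = ans + 1
        have hbans : b = ans := (hval _ _ _ hL hb).1 hge
        have hmax : max ans (b + 1) = ans + 1 := by omega
        rw [if_pos hge, hmax]
        apply ih
        · omega
        · intro v k hk
          rw [PySem.Dict.get?_insert] at hk
          split_ifs at hk with hv
          · simp only [Option.some.injEq] at hk; omega
          · exact lt_trans (hbound v k hk) (by omega)
        · intro v
          rw [PySem.Dict.get?_insert, PySem.Dict.get?_insert]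
          split_ifs with hv
          · simp
          · exact hkeys v
        · intro v k b' hk hb'
          rw [PySem.Dict.get?_insert] at hk hb'
          split_ifs at hk hb' with hv
          · simp only [Option.some.injEq] at hk hb'
            constructor
            · intro _; omega
            · intro hki; exact absurd hki (by omega)
          · have hki : k < i := hbound v k hk
            have := hval v k b' hk hb'
            constructor
            · intro h; exact absurd h (by omega)
            · intro _
              by_cases hpk : prev ≤ k
              · have := this.1 hpk; omega
              · have := this.2 (by omega); omega
      · -- no cut: b + 1 ≤ ans, so max ans (b+1) = ans
        have hble : b + 1 ≤ ans := (hval _ _ _ hL hb).2 (by omega)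
        have hmax : max ans (b + 1) = ans := by omega
        rw [if_neg hge, hmax]
        apply ih
        · omega
        · intro v k hk
          rw [PySem.Dict.get?_insert] at hk
          split_ifs at hk with hv
          · simp only [Option.some.injEq] at hk; omega
          · exact lt_trans (hbound v k hk) (by omega)
        · intro v
          rw [PySem.Dict.get?_insert, PySem.Dict.get?_insert]
          split_ifs with hv
          · simp
          · exact hkeys v
        · intro v k b' hk hb'
          rw [PySem.Dict.get?_insert] at hk hb'
          split_ifs at hk hb' with hv
          · simp only [Option.some.injEq] at hk hb'
            constructor
            · intro _; omega
            · intro hki; exact absurd hki (by omega)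
          · exact hval v k b' hk hb'

-- ===== VERDICT =====
theorem max_beautiful_segments_spec : Claim_equal_max_beautiful_segments := by
  intro arr _
  show max_beautiful_segments arr = max_beautiful_segments_alt arr
  unfold max_beautiful_segments max_beautiful_segments_alt
  apply pvLoop_eq
  · decide
  · intro v j hj
    rw [PySem.Dict.get?_insert] at hj
    split_ifs at hj with hv
    · simp only [Option.some.injEq] at hj; omega
    · simp [PySem.Dict.get?, PySem.Dict.empty] at hj
  · intro v
    rw [PySem.Dict.get?_insert, PySem.Dict.get?_insert]
    split_ifs with hv
    · simp
    · exact Iff.rfl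
  · intro v j b hj hb
    rw [PySem.Dict.get?_insert] at hj hb
    split_ifs at hj hb with hv
    · simp only [Option.some.injEq] at hj hb
      constructor
      · intro _; omega
      · intro h; exact absurd h (by omega)
    · simp [PySem.Dict.get?, PySem.Dict.empty] at hj
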